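-- pv_equiv track=rewrite | github.com/MahmoudKMaarouf/ECE143-Final-Project | .py Files/sentiment_analysis.py | find_polarities
-- ===== SOURCE A (Python) =====
-- def find_polarities(adict):
--     pos_dict = {}
--     neu_dict = {}
--     neg_dict = {}
--     for key, values in adict.items():
--         if values > 0:
--             pos_dict[key] = values
--         elif values == 0:
--             neu_dict[key] = values
--         else:
--             neg_dict[key] = values
--
--     return pos_dict, neu_dict, neg_dict
-- ===== SOURCE B (Python) =====
-- def find_polarities(adict):
--     pos_dict = {k: v for k, v in adict.items() if v > 0}
--     neu_dict = {k: v for k, v in adict.items() if v == 0}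
--     neg_dict = {k: v for k, v in adict.items() if v < 0}
--     return pos_dict, neu_dict, neg_dict
-- ===== Notes on version B (the rewrite author's own statement) =====
-- stated objective: idiomatic
-- what changed: Replaces the single-pass if/elif/else partition loop with three independent dict comprehensions, one filtering pass per sign bucket.
import Mathlib
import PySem

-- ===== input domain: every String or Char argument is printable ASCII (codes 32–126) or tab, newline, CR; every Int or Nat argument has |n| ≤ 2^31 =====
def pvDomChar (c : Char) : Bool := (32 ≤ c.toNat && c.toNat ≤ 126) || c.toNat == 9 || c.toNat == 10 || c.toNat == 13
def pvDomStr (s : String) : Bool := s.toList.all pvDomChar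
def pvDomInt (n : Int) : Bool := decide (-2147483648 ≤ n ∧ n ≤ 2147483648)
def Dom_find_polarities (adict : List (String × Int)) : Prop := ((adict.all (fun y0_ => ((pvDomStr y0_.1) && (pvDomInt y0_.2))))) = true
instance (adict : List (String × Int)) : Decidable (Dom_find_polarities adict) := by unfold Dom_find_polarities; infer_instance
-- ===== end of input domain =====

-- B: three independent dict comprehensions (one filtering pass per sign bucket) instead of A's single if/elif/else partition loop.
-- ===== PORT A =====
-- the for-loop over adict.items(), threading the three dicts as the fold state
def find_polarities (adict : List (String × Int)) : (List (String × Int)) × (List (String × Int)) × (List (String × Int)) :=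
  let s := adict.foldl (fun (s : PySem.Dict String Int × PySem.Dict String Int × PySem.Dict String Int) kv =>
    if kv.2 > 0 then (s.1.insert kv.1 kv.2, s.2.1, s.2.2)
    else if kv.2 = 0 then (s.1, s.2.1.insert kv.1 kv.2, s.2.2)
    else (s.1, s.2.1, s.2.2.insert kv.1 kv.2))
    (PySem.Dict.empty, PySem.Dict.empty, PySem.Dict.empty)
  (s.1.items, s.2.1.items, s.2.2.items)

-- ===== PORT B =====
-- a dict comprehension {k: v for k, v in l if cond} = insert each pair of the filtered list into an empty dict
def pvDictComp (l : List (String × Int)) : PySem.Dict String Int :=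
  l.foldl (fun d kv => d.insert kv.1 kv.2) PySem.Dict.empty

def find_polarities_alt (adict : List (String × Int)) : (List (String × Int)) × (List (String × Int)) × (List (String × Int)) :=
  ((pvDictComp (adict.filter (fun kv => kv.2 > 0))).items,
   (pvDictComp (adict.filter (fun kv => kv.2 = 0))).items,
   (pvDictComp (adict.filter (fun kv => kv.2 < 0))).items)

-- ===== PRECONDITION & SPEC =====
def Spec_find_polarities (adict : List (String × Int)) (out : (List (String × Int)) × (List (String × Int)) × (List (String × Int))) : Prop := out = find_polarities_alt adict
instance (adict : List (String × Int)) (out : (List (String × Int)) × (List (String × Int)) × (List (String × Int))) : Decidable (Spec_find_polarities adict out) := by unfold Spec_find_polarities; infer_instance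

-- ===== CLAIM (what is proved, stated in full; the proofs are below) =====
def Claim_equal_find_polarities : Prop := ∀ (adict : List (String × Int)), Dom_find_polarities adict → Spec_find_polarities adict (find_polarities adict)

-- ===== LEMMAS AND PROOFS =====

-- ===== VERDICT (by name: the statement is the Claim_ definition above) =====
-- loop invariant: A's fold from any start state equals B's three filtered insert-folds from those starts
theorem pv_loop (l : List (String × Int)) (p u n : PySem.Dict String Int) :
    l.foldl (fun (s : PySem.Dict String Int × PySem.Dict String Int × PySem.Dict String Int) kv =>
      if kv.2 > 0 then (s.1.insert kv.1 kv.2, s.2.1, s.2.2)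
      else if kv.2 = 0 then (s.1, s.2.1.insert kv.1 kv.2, s.2.2)
      else (s.1, s.2.1, s.2.2.insert kv.1 kv.2)) (p, u, n)
    = ((l.filter (fun kv => kv.2 > 0)).foldl (fun d kv => d.insert kv.1 kv.2) p,
       (l.filter (fun kv => kv.2 = 0)).foldl (fun d kv => d.insert kv.1 kv.2) u,
       (l.filter (fun kv => kv.2 < 0)).foldl (fun d kv => d.insert kv.1 kv.2) n) := by
  induction l generalizing p u n with
  | nil => rfl
  | cons kv rest ih =>
    rcases lt_trichotomy kv.2 0 with h | h | h
    · simp [List.foldl_cons, h, not_lt.mpr (le_of_lt h), ne_of_lt h, ih]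
    · simp [List.foldl_cons, h, ih]
    · simp [List.foldl_cons, h, not_lt.mpr (le_of_lt h), (ne_of_lt h).symm, ih]

theorem find_polarities_spec : Claim_equal_find_polarities := by
  intro adict _
  show find_polarities adict = find_polarities_alt adict
  simp [find_polarities, find_polarities_alt, pvDictComp, pv_loop]
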